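-- pv_equiv track=rewrite | github.com/vucjipastir/Nordic-Gematria | Futhark.py | calculate_isopsephy
-- ===== SOURCE A (Python) =====
-- futhark_values = {
--     'f': 1, 'u': 2, 't': 3, 'h': 4, 'a': 5, 'r': 6, 'k': 7,
--     'g': 1, 'w': 2, 'n': 3, 'i': 4, 'j': 5, 'y': 6, 'ei': 7,
--     'p': 1, 'z': 2, 's': 3, 'b': 4, 'm': 5, 'l': 6, 'd': 7,
--     'o': 1, 'th': 2, 'c': 3, 'q': 4, 'x': 5, 'v': 6, 'ng':7,
-- }
--
-- def calculate_isopsephy(norse_word):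
--     """Calculate the isopsephy value for a given Norse word."""
--     total = 0
--     word = norse_word.lower()
--     i = 0
--     while i < len(word):
--         if i < len(word) - 1 and word[i:i+2] in futhark_values:
--             total += futhark_values[word[i:i+2]]
--             i += 2
--         elif word[i] in futhark_values:
--             total += futhark_values[word[i]]
--             i += 1
--         else:
--             i += 1
--     return total
-- ===== SOURCE B (Python) =====
-- import re
--
-- futhark_values = {
--     'f': 1, 'u': 2, 't': 3, 'h': 4, 'a': 5, 'r': 6, 'k': 7,
--     'g': 1, 'w': 2, 'n': 3, 'i': 4, 'j': 5, 'y': 6, 'ei': 7,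
--     'p': 1, 'z': 2, 's': 3, 'b': 4, 'm': 5, 'l': 6, 'd': 7,
--     'o': 1, 'th': 2, 'c': 3, 'q': 4, 'x': 5, 'v': 6, 'ng': 7,
-- }
--
-- def calculate_isopsephy(norse_word):
--     """Calculate the isopsephy value for a given Norse word."""
--     tokens = re.findall(r'ei|th|ng|.', norse_word.lower(), re.DOTALL)
--     return sum(futhark_values.get(tok, 0) for tok in tokens)
-- ===== Notes on version B (the rewrite author's own statement) =====
-- stated objective: idiomatic
-- what changed: Replaced the hand-written index/while loop with dict-membership tests by a greedy regex tokenization (re.findall(r'ei|th|ng|.')) followed by a sum of dict .get lookups with default 0.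
import Mathlib
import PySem

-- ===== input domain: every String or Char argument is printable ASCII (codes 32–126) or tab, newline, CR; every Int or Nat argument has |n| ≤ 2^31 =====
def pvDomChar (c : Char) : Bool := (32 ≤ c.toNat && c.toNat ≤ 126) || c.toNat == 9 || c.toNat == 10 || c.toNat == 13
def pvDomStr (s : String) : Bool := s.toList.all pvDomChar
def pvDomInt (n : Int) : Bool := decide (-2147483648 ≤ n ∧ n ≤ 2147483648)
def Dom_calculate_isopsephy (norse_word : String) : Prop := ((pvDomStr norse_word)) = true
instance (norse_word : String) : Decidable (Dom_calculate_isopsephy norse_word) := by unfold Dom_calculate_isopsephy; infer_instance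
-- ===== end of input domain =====

-- B tokenizes with a regex whose alternation prefers the digraph keys; A walks an index with
-- two-then-one dict-membership tests.  Return-value equivalence only; neither mutates anything.

-- ===== PORT A =====
def futhark_values : PySem.Dict String Int := PySem.Dict.ofList
  [("f",1),("u",2),("t",3),("h",4),("a",5),("r",6),("k",7),
   ("g",1),("w",2),("n",3),("i",4),("j",5),("y",6),("ei",7),
   ("p",1),("z",2),("s",3),("b",4),("m",5),("l",6),("d",7),
   ("o",1),("th",2),("c",3),("q",4),("x",5),("v",6),("ng",7)]

-- the while loop of A: i advances by 2 or 1; word[i:i+2] with 0 ≤ i is (drop i).take 2 exactly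
def aLoop (w : List Char) (i : Nat) (total : Int) : Int :=
  if h : i < w.length then
    if i + 1 < w.length ∧ (futhark_values.get? (String.ofList ((w.drop i).take 2))).isSome then
      aLoop w (i + 2) (total + futhark_values.getD (String.ofList ((w.drop i).take 2)) 0)
    else if (futhark_values.get? (String.ofList [w[i]])).isSome then
      aLoop w (i + 1) (total + futhark_values.getD (String.ofList [w[i]]) 0)
    else
      aLoop w (i + 1) total
  else total
termination_by w.length - i

def calculate_isopsephy (norse_word : String) : Int :=
  aLoop (PySem.Str.lower norse_word).toList 0 0

-- ===== PORT B =====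
-- hand port of re.findall(r'ei|th|ng|.', word, re.DOTALL): greedy left-to-right scan, the
-- alternation tries the three digraphs before one arbitrary character — exact for this fixed pattern
def bTokens (l : List Char) : List String :=
  match l with
  | a :: b :: r =>
    if a = 'e' ∧ b = 'i' then "ei" :: bTokens r
    else if a = 't' ∧ b = 'h' then "th" :: bTokens r
    else if a = 'n' ∧ b = 'g' then "ng" :: bTokens r
    else String.ofList [a] :: bTokens (b :: r)
  | [a] => [String.ofList [a]]
  | [] => []

def calculate_isopsephy_alt (norse_word : String) : Int :=
  ((bTokens (PySem.Str.lower norse_word).toList).map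
    (fun tok => futhark_values.getD tok 0)).sum

-- ===== PRECONDITION & SPEC =====
def Spec_calculate_isopsephy (norse_word : String) (out : Int) : Prop := out = calculate_isopsephy_alt norse_word
instance (norse_word : String) (out : Int) : Decidable (Spec_calculate_isopsephy norse_word out) := by unfold Spec_calculate_isopsephy; infer_instance

-- ===== CLAIM (what is proved, stated in full; the proofs are below) =====
def Claim_equal_calculate_isopsephy : Prop := ∀ (norse_word : String), Dom_calculate_isopsephy norse_word → Spec_calculate_isopsephy norse_word (calculate_isopsephy norse_word)

-- ===== LEMMAS AND PROOFS =====

def tokSum (l : List Char) : Int :=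
  ((bTokens l).map (fun tok => futhark_values.getD tok 0)).sum

-- a two-character string is a key of the table iff it is one of the three digraphs
theorem mem2_iff (a b : Char) :
    (futhark_values.get? (String.ofList [a, b])).isSome = true ↔
      (a = 'e' ∧ b = 'i') ∨ (a = 't' ∧ b = 'h') ∨ (a = 'n' ∧ b = 'g') := by
  have hd : futhark_values = PySem.Dict.mk
    [("f",1),("u",2),("t",3),("h",4),("a",5),("r",6),("k",7),
     ("g",1),("w",2),("n",3),("i",4),("j",5),("y",6),("ei",7),
     ("p",1),("z",2),("s",3),("b",4),("m",5),("l",6),("d",7),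
     ("o",1),("th",2),("c",3),("q",4),("x",5),("v",6),("ng",7)] := by decide
  rw [hd]
  simp only [PySem.Dict.get?_mk_cons, beq_iff_eq, String.ext_iff]
  simp [PySem.Dict.get?]
  split_ifs <;> simp_all [eq_comm]

theorem tokSum_nil : tokSum [] = 0 := rfl

theorem tokSum_single (a : Char) :
    tokSum [a] = futhark_values.getD (String.ofList [a]) 0 := by
  simp [tokSum, bTokens]

theorem tokSum_default (a b : Char) (r : List Char)
    (h : ¬ ((a = 'e' ∧ b = 'i') ∨ (a = 't' ∧ b = 'h') ∨ (a = 'n' ∧ b = 'g'))) :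
    tokSum (a :: b :: r) = futhark_values.getD (String.ofList [a]) 0 + tokSum (b :: r) := by
  have h1 : ¬ (a = 'e' ∧ b = 'i') := fun hp => h (Or.inl hp)
  have h2 : ¬ (a = 't' ∧ b = 'h') := fun hp => h (Or.inr (Or.inl hp))
  have h3 : ¬ (a = 'n' ∧ b = 'g') := fun hp => h (Or.inr (Or.inr hp))
  simp [tokSum, bTokens, h1, h2, h3]

theorem aLoop_eq (n : Nat) : ∀ (w : List Char) (i : Nat) (total : Int),
    w.length - i = n → aLoop w i total = total + tokSum (w.drop i) := by
  induction n using Nat.strong_induction_on with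
  | _ n ih =>
    intro w i total hn
    rw [aLoop]
    by_cases hi : i < w.length
    · rw [dif_pos hi]
      have hdrop : w.drop i = w[i] :: w.drop (i + 1) := List.drop_eq_getElem_cons hi
      by_cases h2 : i + 1 < w.length
      · have hdrop2 : w.drop (i + 1) = w[i + 1] :: w.drop (i + 2) := List.drop_eq_getElem_cons h2
        by_cases hm : (futhark_values.get? (String.ofList [w[i], w[i + 1]])).isSome = true
        · have htake : (w.drop i).take 2 = [w[i], w[i + 1]] := by
            rw [hdrop, hdrop2]; rfl
          rw [if_pos ⟨h2, by rw [htake]; exact hm⟩, htake,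
            ih (w.length - (i + 2)) (by omega) w (i + 2) _ rfl, hdrop, hdrop2]
          rcases (mem2_iff _ _).1 hm with ⟨ha, hb⟩ | ⟨ha, hb⟩ | ⟨ha, hb⟩ <;>
            rw [ha, hb] <;> simp [tokSum, bTokens] <;> ring
        · have hcond : ¬ (i + 1 < w.length ∧
              (futhark_values.get? (String.ofList ((w.drop i).take 2))).isSome = true) := by
            have htake : (w.drop i).take 2 = [w[i], w[i + 1]] := by
              rw [hdrop, hdrop2]; rfl
            rw [htake]; exact fun hc => hm hc.2
          rw [if_neg hcond]
          have hts : tokSum (w.drop i) =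
              futhark_values.getD (String.ofList [w[i]]) 0 + tokSum (w.drop (i + 1)) := by
            rw [hdrop, hdrop2]
            exact tokSum_default _ _ _ (fun hp => hm ((mem2_iff _ _).2 hp))
          by_cases hm1 : (futhark_values.get? (String.ofList [w[i]])).isSome = true
          · rw [if_pos hm1, ih (w.length - (i + 1)) (by omega) w (i + 1) _ rfl, hts]; ring
          · rw [if_neg hm1, ih (w.length - (i + 1)) (by omega) w (i + 1) _ rfl, hts]
            have : futhark_values.getD (String.ofList [w[i]]) 0 = 0 := by
              apply PySem.Dict.getD_of_get?_eq_none
              cases hg : futhark_values.get? (String.ofList [w[i]]) with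
              | none => rfl
              | some v => exact absurd (by rw [hg]; rfl) hm1
            simp [this]
      · have hnil : w.drop (i + 1) = [] := List.drop_eq_nil_of_le (by omega)
        have hcond : ¬ (i + 1 < w.length ∧
            (futhark_values.get? (String.ofList ((w.drop i).take 2))).isSome = true) :=
          fun hc => h2 hc.1
        rw [if_neg hcond]
        have hts : tokSum (w.drop i) = futhark_values.getD (String.ofList [w[i]]) 0 := by
          rw [hdrop, hnil, tokSum_single]
        by_cases hm1 : (futhark_values.get? (String.ofList [w[i]])).isSome = true
        · rw [if_pos hm1, ih (w.length - (i + 1)) (by omega) w (i + 1) _ rfl, hnil,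
            tokSum_nil, hts]; ring
        · rw [if_neg hm1, ih (w.length - (i + 1)) (by omega) w (i + 1) _ rfl, hnil,
            tokSum_nil, hts]
          have : futhark_values.getD (String.ofList [w[i]]) 0 = 0 := by
            apply PySem.Dict.getD_of_get?_eq_none
            cases hg : futhark_values.get? (String.ofList [w[i]]) with
            | none => rfl
            | some v => exact absurd (by rw [hg]; rfl) hm1
          simp [this]
    · rw [dif_neg hi, List.drop_eq_nil_of_le (by omega), tokSum_nil]; ring

-- ===== VERDICT (by name: the statement is the Claim_ definition above) =====
theorem calculate_isopsephy_spec : Claim_equal_calculate_isopsephy := by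
  intro w _
  unfold Spec_calculate_isopsephy calculate_isopsephy calculate_isopsephy_alt
  simpa [tokSum] using aLoop_eq _ (PySem.Str.lower w).toList 0 0 rfl
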